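-- pv_equiv track=rewrite | github.com/gabrielfandrade/restaurant-orders | src/analyze_log.py | never_ask
-- ===== SOURCE A (Python) =====
-- def never_ask(orders: list, client: str):
--     orders_filtered = list(filter(
--         lambda order: order['client'] == client, orders))
--
--     menu = set()
--
--     for order in orders:
--         menu.add(order['item'])
--
--     for client_order in orders_filtered:
--         menu.discard(client_order['item'])
--
--     return menu
-- ===== SOURCE B (Python) =====
-- def never_ask(orders: list, client: str):
--     flagged = {}
--     for o in orders:
--         item = o['item']
--         flagged[item] = flagged.get(item, False) or (o['client'] == client)
--     return {item for item, f in flagged.items() if not f}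
-- ===== Notes on version B (the rewrite author's own statement) =====
-- stated objective: alternative
-- what changed: Replaces A's two staged passes (collect every item into a set, then materialize the client's filtered orders and discard their items one by one) with a single pass that maintains a dict mapping each item to a boolean ordered-by-this-client flag, then emits the unflagged keys.
import Mathlib
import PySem

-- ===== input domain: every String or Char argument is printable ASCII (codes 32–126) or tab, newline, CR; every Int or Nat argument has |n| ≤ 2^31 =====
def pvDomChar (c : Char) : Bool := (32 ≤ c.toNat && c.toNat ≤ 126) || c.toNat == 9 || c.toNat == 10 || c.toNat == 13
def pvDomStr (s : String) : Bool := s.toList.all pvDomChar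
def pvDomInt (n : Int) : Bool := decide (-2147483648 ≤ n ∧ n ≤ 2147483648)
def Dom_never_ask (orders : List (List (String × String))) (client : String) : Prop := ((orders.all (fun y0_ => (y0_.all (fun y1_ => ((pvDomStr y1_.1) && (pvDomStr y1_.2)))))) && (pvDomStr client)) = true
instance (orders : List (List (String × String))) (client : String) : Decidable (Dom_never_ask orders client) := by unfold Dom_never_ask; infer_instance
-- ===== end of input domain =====

-- B replaces A's two staged passes (set of all items, then discard the client's items) with a single
-- pass maintaining a dict item -> ordered-by-this-client flag, then emitting the unflagged keys (alternative).

-- ===== PORT A =====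
-- order['client'] / order['item'] are ported as Dict.getD with default "": Pre_never_ask
-- guarantees both keys are present, so the default is never used inside the claim.
def never_ask (orders : List (List (String × String))) (client : String) : List String :=
  let orders_filtered := orders.filter (fun order => (PySem.Dict.mk order).getD "client" "" == client)
  let menu := orders.foldl (fun m order => PySem.Set.add m ((PySem.Dict.mk order).getD "item" "")) PySem.Set.empty
  orders_filtered.foldl (fun m client_order => PySem.Set.discard m ((PySem.Dict.mk client_order).getD "item" "")) menu

-- ===== PORT B =====
def never_ask_alt (orders : List (List (String × String))) (client : String) : List String :=
  let flagged := orders.foldl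
    (fun d o =>
      d.insert ((PySem.Dict.mk o).getD "item" "")
        (d.getD ((PySem.Dict.mk o).getD "item" "") false || ((PySem.Dict.mk o).getD "client" "" == client)))
    PySem.Dict.empty
  PySem.Set.ofList ((flagged.items.filter (fun p => !p.2)).map (fun p => p.1))

-- ===== PRECONDITION & SPEC =====
-- Pre_ excludes exactly the inputs where Python A raises KeyError: an order dict missing key "client" or "item".
def Pre_never_ask (orders : List (List (String × String))) (client : String) : Prop :=
  ∀ o ∈ orders, ((PySem.Dict.mk o).get? "client").isSome ∧ ((PySem.Dict.mk o).get? "item").isSome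
instance (orders : List (List (String × String))) (client : String) : Decidable (Pre_never_ask orders client) := by unfold Pre_never_ask; infer_instance
def pvWitness_never_ask : (List (List (String × String))) × String :=
  ([[("client", "alice"), ("item", "soup")], [("client", "bob"), ("item", "pie")]], "alice")
def Spec_never_ask (orders : List (List (String × String))) (client : String) (out : List String) : Prop := out = never_ask_alt orders client
instance (orders : List (List (String × String))) (client : String) (out : List String) : Decidable (Spec_never_ask orders client out) := by unfold Spec_never_ask; infer_instance

-- ===== CLAIM (what is proved, stated in full; the proofs are below) =====
def Claim_equal_never_ask : Prop := ∀ (orders : List (List (String × String))) (client : String), Dom_never_ask orders client → Pre_never_ask orders client → Spec_never_ask orders client (never_ask orders client)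

-- ===== LEMMAS AND PROOFS =====

theorem foldl_discard_eq_filter (cs : List String) (s : PySem.Set String) :
    cs.foldl PySem.Set.discard s = s.filter (fun x => !cs.contains x) := by
  induction cs generalizing s with
  | nil => simp
  | cons c cs ih =>
      simp only [List.foldl_cons, ih, PySem.Set.discard, List.filter_filter]
      apply List.filter_congr
      intro x _
      simp [beq_eq_decide, eq_comm, Bool.and_comm]

theorem setOfList_aux (xs s : List String) (h : (xs ++ s).Nodup) :
    xs.foldl PySem.Set.add s = s ++ xs := by
  induction xs generalizing s with
  | nil => simp
  | cons x xs ih =>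
      simp only [List.foldl_cons, PySem.Set.add]
      simp only [List.cons_append, List.nodup_cons, List.mem_append, List.nodup_append] at h
      have hx : PySem.Set.contains s x = false := by
        simp [PySem.Set.contains]
        tauto
      rw [hx]
      simp only [Bool.false_eq_true, if_false]
      rw [ih (s ++ [x]) ?_]
      · simp
      · simp only [List.nodup_append, List.nodup_cons, List.mem_append]
        refine ⟨h.2.1, ⟨h.2.2.1, by simp; intro a ha he; exact h.1 (Or.inr (he ▸ ha))⟩, ?_⟩
        intro a ha b hb
        rcases (by simpa using hb) with hb | hb
        · exact h.2.2.2 a ha b hb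
        · intro he; exact h.1 (Or.inl (hb ▸ he ▸ ha))

theorem setOfList_of_nodup (xs : List String) (h : xs.Nodup) : PySem.Set.ofList xs = xs := by
  have := setOfList_aux xs [] (by simpa using h)
  simpa [PySem.Set.ofList_eq_foldl] using this

theorem getD_flagsFold (os : List (List (String × String))) (client : String)
    (d : PySem.Dict String Bool) (k : String) :
    (os.foldl
      (fun d o =>
        d.insert ((PySem.Dict.mk o).getD "item" "")
          (d.getD ((PySem.Dict.mk o).getD "item" "") false || ((PySem.Dict.mk o).getD "client" "" == client)))
      d).getD k false
    = (d.getD k false ||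
        os.any (fun o => ((PySem.Dict.mk o).getD "item" "" == k) && ((PySem.Dict.mk o).getD "client" "" == client))) := by
  induction os generalizing d with
  | nil => simp
  | cons o os ih =>
      simp only [List.foldl_cons, List.any_cons, ih, PySem.Dict.getD_insert]
      by_cases hk : k = (PySem.Dict.mk o).getD "item" ""
      · subst hk; simp [Bool.or_assoc]
      · have h2 : (((PySem.Dict.mk o).getD "item" "" : String) == k) = false := by
          simp; exact fun he => hk he.symm
        simp [hk, h2]

theorem never_ask_spec_aux (orders : List (List (String × String))) (client : String) :
    never_ask orders client = never_ask_alt orders client := by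
  unfold never_ask never_ask_alt
  -- A side: filter over the dedup'd item list
  rw [← PySem.Set.update_map_eq_foldl_add, PySem.Set.update_empty,
      ← List.foldl_map (f := fun o => (PySem.Dict.mk o).getD "item" "") (g := PySem.Set.discard),
      foldl_discard_eq_filter]
  -- B side
  set F := (fun (d : PySem.Dict String Bool) (o : List (String × String)) =>
      d.insert ((PySem.Dict.mk o).getD "item" "")
        (d.getD ((PySem.Dict.mk o).getD "item" "") false || ((PySem.Dict.mk o).getD "client" "" == client))) with hF
  have hnodup : (orders.foldl F PySem.Dict.empty).keys.Nodup :=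
    PySem.Dict.nodup_keys_foldl_insert_key orders _ _ _ PySem.Dict.nodup_keys_empty
  have hkeys : (orders.foldl F PySem.Dict.empty).keys
      = PySem.Set.ofList (orders.map (fun o => (PySem.Dict.mk o).getD "item" "")) := by
    rw [hF, PySem.Dict.keys_foldl_insert_key]
    simp [PySem.Dict.keys_empty, PySem.Set.update, PySem.Set.ofList_eq_foldl]
  show _ = PySem.Set.ofList (List.map (fun p => p.1) (List.filter (fun p => !p.2) (List.foldl F PySem.Dict.empty orders).items))
  rw [PySem.Dict.items_eq_map_keys _ hnodup false]
  rw [List.filter_map, List.map_map]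
  simp only [Function.comp_def]
  rw [List.map_id', hkeys]
  rw [setOfList_of_nodup _ ((PySem.Set.nodup_ofList _).filter _)]
  apply List.filter_congr
  intro x _
  rw [getD_flagsFold]
  simp only [PySem.Dict.getD_empty, Bool.false_or]
  congr 1
  simp only [List.contains_eq_any_beq, List.any_map, List.any_filter, Function.comp_def]
  simp [Bool.and_comm, BEq.comm]

-- ===== VERDICT (by name: the statement is the Claim_ definition above) =====
theorem never_ask_spec : Claim_equal_never_ask := by
  intro orders client _ _
  exact never_ask_spec_aux orders client
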